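-- pv_equiv track=rewrite | github.com/istiophorus/Codility | Python/FlagsAndPeaks.py | find_peaks_distances
-- ===== SOURCE A (Python) =====
-- def find_peaks_distances(arrin):
--     if arrin is None:
--         raise ValueError
--
--     arr = [1000000001] + arrin + [1000000001]
--
--     previous_level = 1000000001
--     was_greater = False
--     previous_peak = -1
--     min_distance = 1000000
--     max_distance = 0
--
--     peaks = []
--     distances = []
--     for ix, x in enumerate(arr):
--         if (x < previous_level) and was_greater:
--             last_peak = ix - 1 - 1
--             peaks.append(last_peak)
--
--             if previous_peak >= 0:
--                 peak_distance = last_peak - previous_peak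
--                 distances.append(peak_distance)
--
--                 if peak_distance < min_distance:
--                     min_distance = peak_distance
--
--                 if peak_distance > max_distance:
--                     max_distance = peak_distance
--
--             previous_peak = last_peak
--
--         was_greater = x > previous_level
--         previous_level = x
--
--     return (peaks, distances, min_distance, max_distance)
-- ===== SOURCE B (Python) =====
-- def find_peaks_distances(arrin):
--     if arrin is None:
--         raise ValueError
--     arr = [1000000001] + arrin + [1000000001]
--     peaks = [i for i, (a, b, c) in enumerate(zip(arr, arr[1:], arr[2:]))
--              if a < b > c]
--     distances = [q - p for p, q in zip(peaks, peaks[1:])]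
--     min_distance = min([1000000] + distances)
--     max_distance = max([0] + distances)
--     return (peaks, distances, min_distance, max_distance)
-- ===== Notes on version B (the rewrite author's own statement) =====
-- stated objective: simpler
-- what changed: Replaces A's single stateful scan (previous_level/was_greater/previous_peak flags with running min/max) by three declarative comprehensions: peaks from a sliding-window zip of triples, distances from zip of adjacent peaks, and min/max via the builtins over seeded lists.
import Mathlib
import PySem

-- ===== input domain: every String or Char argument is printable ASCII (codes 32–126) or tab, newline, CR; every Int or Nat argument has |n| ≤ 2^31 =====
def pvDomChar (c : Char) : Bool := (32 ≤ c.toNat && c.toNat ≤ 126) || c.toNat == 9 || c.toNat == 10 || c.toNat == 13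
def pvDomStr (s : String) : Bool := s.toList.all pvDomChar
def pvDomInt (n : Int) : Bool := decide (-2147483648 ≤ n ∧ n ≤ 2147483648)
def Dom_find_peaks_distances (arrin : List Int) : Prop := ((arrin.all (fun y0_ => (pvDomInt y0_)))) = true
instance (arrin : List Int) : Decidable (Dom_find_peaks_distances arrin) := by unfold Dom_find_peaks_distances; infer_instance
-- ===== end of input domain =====

-- B replaces A's one stateful scan by sliding-window/zip comprehensions plus builtin min/max; objective: simpler.

-- ===== PORT A =====
-- A's for-loop over enumerate(arr), carried state (previous_level, was_greater,
-- previous_peak, min_distance, max_distance, peaks, distances), as the obvious recursion.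
def pvLoopA : List (Int × Int) → Int → Bool → Int → Int → Int → List Int → List Int →
    List Int × List Int × Int × Int
  | [], _, _, _, mn, mx, pk, ds => (pk, ds, mn, mx)
  | (ix, x) :: rest, pl, wg, pp, mn, mx, pk, ds =>
    if x < pl ∧ wg = true then
      let lp := ix - 1 - 1
      if pp ≥ 0 then
        let d := lp - pp
        pvLoopA rest x (decide (x > pl)) lp (if d < mn then d else mn)
          (if d > mx then d else mx) (pk ++ [lp]) (ds ++ [d])
      else
        pvLoopA rest x (decide (x > pl)) lp mn mx (pk ++ [lp]) ds
    else
      pvLoopA rest x (decide (x > pl)) pp mn mx pk ds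

def find_peaks_distances (arrin : List Int) : List Int × List Int × Int × Int :=
  let arr := [1000000001] ++ arrin ++ [1000000001]
  pvLoopA (PySem.List.enumerate arr 0) 1000000001 false (-1) 1000000 0 [] []

-- ===== PORT B =====
def find_peaks_distances_alt (arrin : List Int) : List Int × List Int × Int × Int :=
  let arr := [1000000001] ++ arrin ++ [1000000001]
  let peaks := (PySem.List.enumerate
      (arr.zip ((PySem.List.slice arr (some 1) none).zip (PySem.List.slice arr (some 2) none))) 0).filterMap
      (fun p => if p.2.1 < p.2.2.1 ∧ p.2.2.1 > p.2.2.2 then some p.1 else none)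
  let distances := (peaks.zip (PySem.List.slice peaks (some 1) none)).map (fun p => p.2 - p.1)
  let min_distance := (PySem.List.min? ((1000000 : Int) :: distances) (fun y => y)).getD 0
  let max_distance := (PySem.List.max? ((0 : Int) :: distances) (fun y => y)).getD 0
  (peaks, distances, min_distance, max_distance)

-- ===== PRECONDITION & SPEC =====
def Spec_find_peaks_distances (arrin : List Int) (out : List Int × List Int × Int × Int) : Prop := out = find_peaks_distances_alt arrin
instance (arrin : List Int) (out : List Int × List Int × Int × Int) : Decidable (Spec_find_peaks_distances arrin out) := by unfold Spec_find_peaks_distances; infer_instance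

-- ===== CLAIM (what is proved, stated in full; the proofs are below) =====
def Claim_equal_find_peaks_distances : Prop := ∀ (arrin : List Int), Dom_find_peaks_distances arrin → Spec_find_peaks_distances arrin (find_peaks_distances arrin)

-- ===== LEMMAS AND PROOFS =====

-- Spec-side helpers for the proof only.
-- Peaks of the triple-window recursion starting at index i.
def pvPeaksT : Int → List Int → List Int
  | i, a :: b :: c :: rest => (if a < b ∧ b > c then [i] else []) ++ pvPeaksT (i+1) (b :: c :: rest)
  | _, _ => []

-- Peaks as A's scan sees them: next index ix, previous level pl, was_greater flag.
def pvPeaksW : Int → Int → Bool → List Int → List Int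
  | ix, pl, wg, x :: rest =>
      (if x < pl ∧ wg = true then [ix - 1 - 1] else []) ++ pvPeaksW (ix+1) x (decide (x > pl)) rest
  | _, _, _, [] => []

-- Distances as A emits them: running previous peak p, guarded by p ≥ 0.
def pvDiffsA : Int → List Int → List Int
  | p, q :: rest => (if p ≥ 0 then [q - p] else []) ++ pvDiffsA q rest
  | _, [] => []

theorem pvLoopA_spec (t : List Int) : ∀ (ix pl : Int) (wg : Bool) (pp mn mx : Int) (pk ds : List Int),
    pvLoopA (PySem.List.enumerate t ix) pl wg pp mn mx pk ds =
      (pk ++ pvPeaksW ix pl wg t,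
       ds ++ pvDiffsA pp (pvPeaksW ix pl wg t),
       (pvDiffsA pp (pvPeaksW ix pl wg t)).foldl (fun m d => if d < m then d else m) mn,
       (pvDiffsA pp (pvPeaksW ix pl wg t)).foldl (fun m d => if d > m then d else m) mx) := by
  induction t with
  | nil => intro ix pl wg pp mn mx pk ds; simp [PySem.List.enumerate, pvLoopA, pvPeaksW, pvDiffsA]
  | cons x rest ih =>
    intro ix pl wg pp mn mx pk ds
    rw [PySem.List.enumerate_cons]
    by_cases h : x < pl ∧ wg = true
    · by_cases hp : pp ≥ 0
      · simp only [pvLoopA, if_pos h, ih, pvPeaksW, pvDiffsA, if_pos hp,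
          List.cons_append, List.foldl_cons, List.append_assoc, List.nil_append]
      · simp only [pvLoopA, if_pos h, ih, pvPeaksW, pvDiffsA, if_neg hp,
          List.cons_append, List.append_assoc, List.nil_append]
    · simp only [pvLoopA, if_neg h, ih, pvPeaksW, List.nil_append]

theorem pvPeaksW_eq_peaksT (rest : List Int) : ∀ (a b ix : Int),
    pvPeaksW ix b (decide (b > a)) rest = pvPeaksT (ix - 1 - 1) (a :: b :: rest) := by
  induction rest with
  | nil => intro a b ix; simp [pvPeaksW, pvPeaksT]
  | cons x r ih =>
    intro a b ix
    have h2 : ix + 1 - 1 - 1 = ix - 1 - 1 + 1 := by omega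
    simp only [pvPeaksW, pvPeaksT, ih b x (ix + 1), h2]
    congr 1
    by_cases h : a < b ∧ b > x
    · rw [if_pos h, if_pos (by simp [h.2, h.1])]
    · rw [if_neg h, if_neg (by intro hc; exact h ⟨by simpa using hc.2, hc.1⟩)]

theorem pvPeaksT_shift (a : Int) (t : List Int) :
    pvPeaksT (-1) (a :: a :: t) = pvPeaksT 0 (a :: t) := by
  cases t with
  | nil => simp [pvPeaksT]
  | cons x r => simp [pvPeaksT]

theorem pvPeaksT_nonneg (l : List Int) : ∀ (i : Int), 0 ≤ i → ∀ p ∈ pvPeaksT i l, 0 ≤ p := by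
  induction l with
  | nil => intro i _ p hp; simp [pvPeaksT] at hp
  | cons a rest ih =>
    intro i hi p hp
    cases rest with
    | nil => simp [pvPeaksT] at hp
    | cons b rest' =>
      cases rest' with
      | nil => simp [pvPeaksT] at hp
      | cons c rest'' =>
        simp only [pvPeaksT, List.mem_append] at hp
        rcases hp with hp | hp
        · split at hp <;> simp at hp; omega
        · exact ih (i+1) (by omega) p hp

theorem pvZipB (l : List Int) : ∀ (i : Int),
    (PySem.List.enumerate (l.zip ((l.drop 1).zip (l.drop 2))) i).filterMap
      (fun p => if p.2.1 < p.2.2.1 ∧ p.2.2.1 > p.2.2.2 then some p.1 else none) = pvPeaksT i l := by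
  induction l with
  | nil => intro i; simp [pvPeaksT]
  | cons a rest ih =>
    intro i
    cases rest with
    | nil => simp [pvPeaksT]
    | cons b rest' =>
      cases rest' with
      | nil => simp [pvPeaksT]
      | cons c rest'' =>
        simp only [List.drop, List.zip_cons_cons, PySem.List.enumerate_cons,
          List.filterMap_cons, pvPeaksT]
        by_cases hc : a < b ∧ b > c
        · simpa [hc] using ih (i + 1)
        · simpa [hc] using ih (i + 1)

theorem pvDiffsA_adj (P : List Int) : ∀ (q : Int), 0 ≤ q → (∀ p ∈ P, 0 ≤ p) →
    pvDiffsA q P = ((q :: P).zip P).map (fun p => p.2 - p.1) := by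
  induction P with
  | nil => intro q _ _; simp [pvDiffsA]
  | cons x r ih =>
    intro q hq hP
    simp only [pvDiffsA, if_pos hq, List.zip_cons_cons, List.map_cons, List.singleton_append]
    rw [ih x (hP x (by simp)) (fun p hp => hP p (by simp [hp]))]

theorem pvDiffsA_neg_one (P : List Int) (hP : ∀ p ∈ P, 0 ≤ p) :
    pvDiffsA (-1) P = (P.zip (P.drop 1)).map (fun p => p.2 - p.1) := by
  cases P with
  | nil => simp [pvDiffsA]
  | cons x r =>
    simp only [pvDiffsA, if_neg (by omega : ¬ (-1 : Int) ≥ 0), List.nil_append, List.drop_one]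
    rw [pvDiffsA_adj r x (hP x (by simp)) (fun p hp => hP p (by simp [hp]))]
    cases r <;> simp

theorem pvFoldMin (D : List Int) (m : Int) :
    D.foldl (fun m d => if d < m then d else m) m = D.foldl min m := by
  induction D generalizing m with
  | nil => rfl
  | cons d r ih =>
    simp only [List.foldl_cons, ih]
    congr 1
    rcases lt_or_ge d m with h | h
    · simp [if_pos h, min_eq_right (le_of_lt h)]
    · simp [if_neg (not_lt.mpr h), min_eq_left h]

theorem pvFoldMax (D : List Int) (m : Int) :
    D.foldl (fun m d => if d > m then d else m) m = D.foldl max m := by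
  induction D generalizing m with
  | nil => rfl
  | cons d r ih =>
    simp only [List.foldl_cons, ih]
    congr 1
    rcases lt_or_ge m d with h | h
    · simp [if_pos h, max_eq_right (le_of_lt h)]
    · simp [if_neg (not_lt.mpr h), max_eq_left h]

-- ===== VERDICT (by name: the statement is the Claim_ definition above) =====
theorem find_peaks_distances_spec : Claim_equal_find_peaks_distances := by
  intro arrin _
  unfold Spec_find_peaks_distances find_peaks_distances find_peaks_distances_alt
  simp only []
  have harr : ([(1000000001 : Int)] ++ arrin ++ [1000000001])
      = (1000000001 : Int) :: (arrin ++ [1000000001]) := by simp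
  set t := arrin ++ [(1000000001 : Int)] with ht
  have hw : pvPeaksW 0 1000000001 false ((1000000001 : Int) :: t)
      = pvPeaksT 0 ((1000000001 : Int) :: t) := by
    have h0 : pvPeaksW 0 1000000001 false ((1000000001 : Int) :: t)
        = pvPeaksW 1 1000000001 (decide ((1000000001:Int) > 1000000001)) t := by
      simp [pvPeaksW]
    rw [h0, pvPeaksW_eq_peaksT t 1000000001 1000000001 1]
    have : (1 : Int) - 1 - 1 = -1 := by norm_num
    rw [this, pvPeaksT_shift]
  have hs1 : PySem.List.slice ((1000000001 : Int) :: t) (some 1) none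
      = ((1000000001 : Int) :: t).drop 1 := by
    simpa using PySem.List.slice_from_natCast ((1000000001 : Int) :: t) 1
  have hs2 : PySem.List.slice ((1000000001 : Int) :: t) (some 2) none
      = ((1000000001 : Int) :: t).drop 2 := by
    simpa using PySem.List.slice_from_natCast ((1000000001 : Int) :: t) 2
  rw [harr, hs1, hs2, pvZipB ((1000000001 : Int) :: t) 0,
    pvLoopA_spec ((1000000001 : Int) :: t) 0 1000000001 false (-1) 1000000 0 [] [], hw]
  set P := pvPeaksT 0 ((1000000001 : Int) :: t) with hP
  have hnn : ∀ p ∈ P, (0 : Int) ≤ p := pvPeaksT_nonneg _ 0 le_rfl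
  have hsp : PySem.List.slice P (some 1) none = P.drop 1 := by
    simpa using PySem.List.slice_from_natCast P 1
  rw [hsp, ← pvDiffsA_neg_one P hnn]
  set D := pvDiffsA (-1) P with hD
  have hmin : (PySem.List.min? ((1000000 : Int) :: D) (fun y => y)).getD 0
      = D.foldl (fun m d => if d < m then d else m) 1000000 := by
    rw [PySem.List.min?_id_cons, pvFoldMin]; rfl
  have hmax : (PySem.List.max? ((0 : Int) :: D) (fun y => y)).getD 0
      = D.foldl (fun m d => if d > m then d else m) 0 := by
    rw [PySem.List.max?_id_cons, pvFoldMax]; rfl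
  rw [hmin, hmax]
  simp
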